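-- pv_equiv track=rewrite | github.com/wentaoc24/Geopolitical-Alignment-AI | scripts/usage_weighted_alignment.py | find_country_mentions
-- ===== SOURCE A (Python) =====
-- def find_country_mentions(text: str, country_map: dict[str, str]) -> list[tuple[int, str, str]]:
--     """
--     Return list of (char_position, matched_phrase, iso3c) tuples.
--     Searches for country names in descending length order to prefer longer matches.
--     """
--     text_lower = text.lower()
--     mentions: list[tuple[int, str, str]] = []
--     seen_positions: set[int] = set()
--     for phrase in sorted(country_map, key=len, reverse=True):
--         start = 0
--         while True:
--             idx = text_lower.find(phrase, start)
--             if idx == -1: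
--                 break
--             # Avoid overlapping matches
--             if not any(abs(idx - sp) < len(phrase) for sp in seen_positions):
--                 mentions.append((idx, phrase, country_map[phrase]))
--                 seen_positions.add(idx)
--             start = idx + 1
--     return sorted(mentions, key=lambda x: x[0])
-- ===== SOURCE B (Python) =====
-- def find_country_mentions(text: str, country_map: dict[str, str]) -> list[tuple[int, str, str]]:
--     """
--     Single left-to-right scan over the text: at each position, hash-look-up the
--     window of every distinct phrase length in a bucket dict (multi-pattern
--     dictionary matching), collecting each phrase's occurrence positions in one
--     pass; then one replay pass in length-descending phrase order applies the
--     overlap filter.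
--     """
--     text_lower = text.lower()
--     n = len(text_lower)
--     lengths = sorted({len(p) for p in country_map})
--     buckets: dict[str, list[int]] = {p: [] for p in country_map}
--     for i in range(n + 1):
--         for m in lengths:
--             if i + m <= n:
--                 w = text_lower[i:i + m]
--                 if w in buckets:
--                     buckets[w].append(i)
--     mentions: list[tuple[int, str, str]] = []
--     seen_positions: set[int] = set()
--     for phrase in sorted(buckets, key=len, reverse=True):
--         m = len(phrase)
--         for idx in buckets[phrase]:
--             if all(abs(idx - sp) >= m for sp in seen_positions):
--                 mentions.append((idx, phrase, country_map[phrase]))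
--                 seen_positions.add(idx)
--     return sorted(mentions, key=lambda x: x[0])
-- ===== Notes on version B (the rewrite author's own statement) =====
-- stated objective: alternative
-- what changed: A searches the text once per phrase with repeated str.find calls; B makes ONE left-to-right scan of the text, hash-looking-up the window of each distinct phrase length in a bucket dict (dictionary multi-pattern matching) to collect every phrase's occurrence positions in a single pass, then replays the same overlap filter in length-descending phrase order.
import Mathlib
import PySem

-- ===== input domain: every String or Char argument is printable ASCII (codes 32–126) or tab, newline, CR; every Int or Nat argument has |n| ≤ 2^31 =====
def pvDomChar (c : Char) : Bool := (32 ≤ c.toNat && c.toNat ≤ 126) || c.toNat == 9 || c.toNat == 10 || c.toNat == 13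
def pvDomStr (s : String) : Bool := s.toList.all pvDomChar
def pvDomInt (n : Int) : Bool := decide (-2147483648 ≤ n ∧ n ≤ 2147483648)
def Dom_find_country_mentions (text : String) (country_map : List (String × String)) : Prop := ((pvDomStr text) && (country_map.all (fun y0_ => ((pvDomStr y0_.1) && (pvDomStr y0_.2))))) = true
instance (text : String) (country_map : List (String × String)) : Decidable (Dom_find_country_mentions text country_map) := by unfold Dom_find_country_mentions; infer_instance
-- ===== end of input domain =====

-- B replaces A's per-phrase str.find loops by ONE left-to-right scan of the text that
-- hash-looks-up, at each position, the window of every distinct phrase length in a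
-- bucket dict, then replays the same overlap filter in length-descending phrase order
-- (objective: alternative; same return value).

-- shared helpers (identical sub-expressions of both Python sources):
-- the dict's keys, each once, in insertion order
def pvKeys (country_map : List (String × String)) : List String :=
  PySem.List.dedup (country_map.map (·.1))

-- country_map[phrase]
def pvCode (country_map : List (String × String)) (p : String) : String :=
  (PySem.Dict.mk country_map).getD p ""

-- ===== PORT A =====
-- sorted(country_map, key=len, reverse=True)
def pvPhrases (country_map : List (String × String)) : List String :=
  PySem.List.sorted (pvKeys country_map) (fun s => s.toList.length) true

-- the 'while True' find loop; fuel = enough iterations (start strictly increases, bounded by len+1)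
def pvFindLoop (tl : List Char) (p : String) (code : String) :
    Nat → Nat → (List (Int × String × String) × PySem.Set Int) →
    (List (Int × String × String) × PySem.Set Int)
  | 0, _, st => st
  | fuel+1, start, st =>
    let idx := PySem.Chars.findFrom tl p.toList (start : Int) none
    if idx = -1 then st
    else
      let st' := if st.2.any (fun sp => decide (|idx - sp| < (p.toList.length : Int)))
        then st
        else (st.1 ++ [(idx, p, code)], st.2.add idx)
      pvFindLoop tl p code fuel (idx.toNat + 1) st'

def find_country_mentions (text : String) (country_map : List (String × String)) :
    List (Int × String × String) :=
  let text_lower := PySem.Chars.lower text.toList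
  let res := (pvPhrases country_map).foldl
    (fun st p => pvFindLoop text_lower p (pvCode country_map p) (text_lower.length + 2) 0 st)
    ([], PySem.Set.empty)
  PySem.List.sorted res.1 (fun x => x.1) false

-- ===== PORT B =====
-- body of the inner 'for m in lengths' loop: look the window up in the bucket dict
def pvInnerStep (tl : List Char) (i : Int) (d : PySem.Dict String (List Int)) (m : Int) :
    PySem.Dict String (List Int) :=
  if i + m ≤ (tl.length : Int) then
    if d.contains (String.ofList (PySem.List.slice tl (some i) (some (i + m))))
    then d.modify (String.ofList (PySem.List.slice tl (some i) (some (i + m)))) [] (fun l => l ++ [i])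
    else d
  else d

-- the single scan: 'for i in range(n + 1): for m in lengths: …'
def pvScan (tl : List Char) (lengths : List Int) (d : PySem.Dict String (List Int)) :
    PySem.Dict String (List Int) :=
  (PySem.List.pyRange 0 ((tl.length : Int) + 1) 1).foldl
    (fun d i => lengths.foldl (pvInnerStep tl i) d) d

def find_country_mentions_alt (text : String) (country_map : List (String × String)) :
    List (Int × String × String) :=
  let text_lower := PySem.Chars.lower text.toList
  let lengths := PySem.List.sorted
    (PySem.Set.ofList ((pvKeys country_map).map (fun p => (p.toList.length : Int))))
    (fun x => x) false
  let buckets0 := (pvKeys country_map).foldl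
    (fun d p => d.insert p ([] : List Int)) PySem.Dict.empty
  let buckets := pvScan text_lower lengths buckets0
  let res := (PySem.List.sorted buckets.keys (fun s => s.toList.length) true).foldl
    (fun st p =>
      (buckets.getD p []).foldl
        (fun st idx =>
          if st.2.all (fun sp => decide ((p.toList.length : Int) ≤ |idx - sp|))
          then (st.1 ++ [(idx, p, pvCode country_map p)], st.2.add idx)
          else st) st)
    ([], PySem.Set.empty)
  PySem.List.sorted res.1 (fun x => x.1) false

-- ===== PRECONDITION & SPEC =====
def Spec_find_country_mentions (text : String) (country_map : List (String × String)) (out : List (Int × String × String)) : Prop := out = find_country_mentions_alt text country_map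
instance (text : String) (country_map : List (String × String)) (out : List (Int × String × String)) : Decidable (Spec_find_country_mentions text country_map out) := by unfold Spec_find_country_mentions; infer_instance

-- ===== CLAIM (what is proved, stated in full; the proofs are below) =====
def Claim_equal_find_country_mentions : Prop := ∀ (text : String) (country_map : List (String × String)), Dom_find_country_mentions text country_map → Spec_find_country_mentions text country_map (find_country_mentions text country_map)

-- ===== LEMMAS AND PROOFS =====

-- all occurrence positions of p in tl, ascending
def pvOccs (tl p : List Char) : List Nat :=
  (List.range (tl.length + 1 - p.length)).filter (fun i => decide (p <+: tl.drop i))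

-- those occurrence positions that are ≥ k
def pvOccsGE (tl p : List Char) (k : Nat) : List Nat :=
  (pvOccs tl p).filter (fun i => decide (k ≤ i))

-- B's accept/reject step
def pvStep (p code : String) (st : List (Int × String × String) × PySem.Set Int) (idx : Int) :
    List (Int × String × String) × PySem.Set Int :=
  if st.2.all (fun sp => decide ((p.toList.length : Int) ≤ |idx - sp|))
  then (st.1 ++ [(idx, p, code)], st.2.add idx)
  else st

-- "position i carries an occurrence of p" (the window fits and matches)
def pvCond (tl : List Char) (p : String) (i : Nat) : Bool :=
  decide (i + p.toList.length ≤ tl.length) && decide (p.toList <+: tl.drop i)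

-- A's branch is B's branch (not any(< m)  =  all(≥ m))
lemma pvStep_eq (p code : String) (st : List (Int × String × String) × PySem.Set Int) (idx : Int) :
    (if st.2.any (fun sp => decide (|idx - sp| < (p.toList.length : Int))) then st
     else (st.1 ++ [(idx, p, code)], st.2.add idx)) = pvStep p code st idx := by
  unfold pvStep
  have h : (st.2.all (fun sp => decide ((p.toList.length : Int) ≤ |idx - sp|)))
      = !(st.2.any (fun sp => decide (|idx - sp| < (p.toList.length : Int)))) := by
    simp only [List.all_eq_not_any_not]
    have hfun : (fun x : Int => !decide ((p.toList.length : Int) ≤ |idx - x|))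
        = (fun sp : Int => decide (|idx - sp| < (p.toList.length : Int))) := by
      funext x
      simp only [← decide_not, decide_eq_decide]
      omega
    rw [hfun]
  rw [h]
  cases st.2.any (fun sp => decide (|idx - sp| < (p.toList.length : Int))) <;> simp

-- CPython quirk: a start past len(s) gives -1 even for the empty pattern
lemma pvFindFrom_past (s sub : List Char) (k : Nat) (h : s.length < k) :
    PySem.Chars.findFrom s sub (k : Int) none = -1 := by
  simp only [PySem.Chars.findFrom]
  have h1 : ¬ ((k : Int) < 0) := by omega
  simp [h1]
  omega

-- generic: splitting a filtered range at its minimal admitted element ≥ k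
lemma pvFilter_min {q : Nat → Bool} {t k r : Nat} (hkr : k ≤ r) (hrt : r < t) (hq : q r = true)
    (hmin : ∀ i, k ≤ i → i < r → q i = false) :
    ((List.range t).filter q).filter (fun i => decide (k ≤ i))
      = r :: ((List.range t).filter q).filter (fun i => decide (r + 1 ≤ i)) := by
  have hsplit : List.range t = List.range r ++ r :: List.range' (r + 1) (t - r - 1) := by
    rw [List.range_eq_range', List.range_eq_range']
    have h1 : List.range' 0 r ++ List.range' (0 + 1 * r) (t - r) 1 = List.range' 0 (r + (t - r)) :=
      List.range'_append
    have h2 : r + (t - r) = t := by omega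
    have h3 : 0 + 1 * r = r := by omega
    rw [h2, h3] at h1
    rw [← h1]
    congr 1
    have h4 : t - r = (t - r - 1) + 1 := by omega
    rw [h4, List.range'_succ]
    norm_num
  rw [hsplit]
  simp only [List.filter_append, List.filter_cons, hq, if_true]
  have hlowL : ((List.range r).filter q).filter (fun i => decide (k ≤ i)) = [] := by
    rw [List.filter_eq_nil_iff]
    intro a ha hdec
    simp only [List.mem_filter, List.mem_range] at ha
    simp only [decide_eq_true_eq] at hdec
    have := hmin a hdec ha.1
    rw [this] at ha
    exact Bool.false_ne_true ha.2
  have hlowR : ((List.range r).filter q).filter (fun i => decide (r + 1 ≤ i)) = [] := by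
    rw [List.filter_eq_nil_iff]
    intro a ha hdec
    simp only [List.mem_filter, List.mem_range] at ha
    simp only [decide_eq_true_eq] at hdec
    omega
  have h1 : (decide (k ≤ r)) = true := by simp [hkr]
  have h2 : (decide (r + 1 ≤ r)) = false := by simp
  rw [h1, h2, hlowL, hlowR]
  simp only [List.nil_append, if_true, Bool.false_eq_true, if_false]
  congr 1
  apply List.filter_congr
  intro a ha
  simp only [List.mem_filter, List.mem_range'] at ha
  have h5 : r + 1 ≤ a := by
    obtain ⟨⟨i, hi, rfl⟩, -⟩ := ha
    omega
  have h6 : k ≤ a := by omega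
  simp [h5, h6]

-- no occurrence at or after k: the tail list is empty
lemma pvOccsGE_nil (tl p : List Char) (k : Nat) (h : ¬ p <:+: tl.drop k) :
    pvOccsGE tl p k = [] := by
  unfold pvOccsGE pvOccs
  rw [List.filter_filter, List.filter_eq_nil_iff]
  intro a ha hdec
  simp only [List.mem_range] at ha
  simp only [Bool.and_eq_true, decide_eq_true_eq] at hdec
  apply h
  rw [← (PySem.Chars.isIn_iff_infix p (tl.drop k)), ← PySem.Chars.exists_prefix_drop_iff_isIn]
  refine ⟨a - k, ?_⟩
  rw [List.drop_drop]
  have : k + (a - k) = a := by omega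
  rw [this]
  exact hdec.2

-- the head of pvOccsGE k is the first occurrence found from k
lemma pvOccsGE_cons (tl p : List Char) (k r : Nat) (hkr : k ≤ r) (hrn : r + p.length ≤ tl.length)
    (hpre : p <+: tl.drop r) (hmin : ∀ i, k ≤ i → i < r → ¬ p <+: tl.drop i) :
    pvOccsGE tl p k = r :: pvOccsGE tl p (r + 1) := by
  unfold pvOccsGE pvOccs
  apply pvFilter_min hkr
  · omega
  · simp [hpre]
  · intro i h1 h2
    simp [hmin i h1 h2]

-- A's find loop from start = k is a fold of pvStep over the occurrences ≥ k
lemma pvLoop_eq (tl : List Char) (p code : String) :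
    ∀ (fuel k : Nat) (st : List (Int × String × String) × PySem.Set Int),
    k ≤ tl.length + 1 → tl.length + 2 ≤ fuel + k →
    pvFindLoop tl p code fuel k st
      = (pvOccsGE tl p.toList k).foldl (fun st (i : Nat) => pvStep p code st (i : Int)) st := by
  intro fuel
  induction fuel with
  | zero => intro k st hk hf; omega
  | succ fuel ih =>
    intro k st hk hf
    by_cases hkn : k ≤ tl.length
    · by_cases hneg : PySem.Chars.findFrom tl p.toList (k : Int) none = -1
      · rw [pvFindLoop]
        simp only [hneg, reduceIte]
        rw [pvOccsGE_nil tl p.toList k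
          ((PySem.Chars.findFrom_natCast_eq_neg_one_iff tl p.toList k hkn).mp hneg)]
        rfl
      · obtain ⟨hge, hpre, hmin⟩ := PySem.Chars.findFrom_natCast_spec tl p.toList k hkn hneg
        set idx := PySem.Chars.findFrom tl p.toList (k : Int) none with hidxdef
        have hnonneg : 0 ≤ idx := le_trans (by omega) hge
        set r := idx.toNat with hrdef
        have hidxr : idx = (r : Int) := by omega
        have hkr : k ≤ r := by omega
        have hrn : r + p.toList.length ≤ tl.length := by
          have h1 := List.IsPrefix.length_le hpre
          rw [List.length_drop] at h1
          have hle : idx ≤ (tl.length : Int) := by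
            rw [PySem.Chars.findFrom_natCast tl p.toList k hkn] at hidxdef
            by_cases hfind : PySem.Chars.find (tl.drop k) p.toList = -1
            · rw [hidxdef]; simp [hfind]
            · rw [hidxdef]
              simp only [hfind, reduceIte]
              have := PySem.Chars.find_le_length (tl.drop k) p.toList
              rw [List.length_drop] at this
              omega
          omega
        have hloop : pvFindLoop tl p code (fuel + 1) k st
            = pvFindLoop tl p code fuel (r + 1) (pvStep p code st (r : Int)) := by
          rw [pvFindLoop]
          simp only [← hidxdef, hneg, reduceIte]
          simp only [hidxr]
          rw [pvStep_eq]
          simp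
        rw [hloop]
        rw [pvOccsGE_cons tl p.toList k r hkr hrn hpre (fun i h1 h2 => hmin i h1 h2)]
        rw [List.foldl_cons]
        exact ih (r + 1) (pvStep p code st (r : Int)) (by omega) (by omega)
    · have hidx : PySem.Chars.findFrom tl p.toList (k : Int) none = -1 :=
        pvFindFrom_past tl p.toList k (by omega)
      rw [pvFindLoop]
      simp only [hidx, reduceIte]
      have hnil : pvOccsGE tl p.toList k = [] := by
        unfold pvOccsGE pvOccs
        rw [List.filter_filter, List.filter_eq_nil_iff]
        intro a ha hdec
        simp only [List.mem_range] at ha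
        simp only [Bool.and_eq_true, decide_eq_true_eq] at hdec
        omega
      rw [hnil]
      rfl

-- A's whole inner loop for one phrase = fold of pvStep over all its occurrences
lemma pvA_eq (tl : List Char) (p code : String)
    (st : List (Int × String × String) × PySem.Set Int) :
    pvFindLoop tl p code (tl.length + 2) 0 st
      = ((pvOccs tl p.toList).map (fun k : Nat => (k : Int))).foldl
          (fun st i => pvStep p code st i) st := by
  rw [pvLoop_eq tl p code (tl.length + 2) 0 st (by omega) (by omega), List.foldl_map]
  have h0 : pvOccsGE tl p.toList 0 = pvOccs tl p.toList := by
    unfold pvOccsGE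
    apply List.filter_eq_self.mpr
    intro a _
    simp
  rw [h0]

-- ── B-side lemmas ──

-- pvInnerStep never changes the key set
lemma pvInnerStep_keys (tl : List Char) (i : Int) (d : PySem.Dict String (List Int)) (m : Int) :
    (pvInnerStep tl i d m).keys = d.keys := by
  unfold pvInnerStep
  split_ifs with h1 h2
  · rw [PySem.Dict.keys_modify, PySem.Dict.keys_insert_of_contains _ _ h2]
  · rfl
  · rfl

-- nor the contains test
lemma pvInnerStep_contains (tl : List Char) (i : Int) (d : PySem.Dict String (List Int))
    (m : Int) (q : String) : (pvInnerStep tl i d m).contains q = d.contains q := by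
  unfold pvInnerStep
  split_ifs with h1 h2
  · rw [PySem.Dict.contains_modify]
    by_cases hq : q = String.ofList (PySem.List.slice tl (some i) (some (i + m)))
    · subst hq; simp [h2]
    · simp [hq]
  · rfl
  · rfl

-- folds of key-preserving steps preserve keys
lemma pvKeys_foldl {α : Type}
    (f : PySem.Dict String (List Int) → α → PySem.Dict String (List Int))
    (h : ∀ d x, (f d x).keys = d.keys) :
    ∀ (l : List α) (d : PySem.Dict String (List Int)), (l.foldl f d).keys = d.keys := by
  intro l
  induction l with
  | nil => intro d; rfl
  | cons x l ih => intro d; rw [List.foldl_cons, ih, h]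

lemma pvContains_of_keys_eq (d e : PySem.Dict String (List Int))
    (h : e.keys = d.keys) (p : String) : e.contains p = d.contains p := by
  by_cases hp : p ∈ d.keys
  · rw [(PySem.Dict.contains_iff_mem_keys d p).mpr hp,
      (PySem.Dict.contains_iff_mem_keys e p).mpr (h ▸ hp)]
  · have h1 : d.contains p = false := by
      cases hc : d.contains p
      · rfl
      · exact absurd ((PySem.Dict.contains_iff_mem_keys d p).mp hc) hp
    have h2 : e.contains p = false := by
      cases hc : e.contains p
      · rfl
      · exact absurd (h ▸ (PySem.Dict.contains_iff_mem_keys e p).mp hc) hp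
    rw [h1, h2]

-- the bucket-initialising fold: every bucket is []
lemma pvInit_getD (l : List String) :
    ∀ (d : PySem.Dict String (List Int)) (p : String), d.getD p [] = [] →
    (l.foldl (fun d q => d.insert q ([] : List Int)) d).getD p [] = [] := by
  induction l with
  | nil => intro d p h; exact h
  | cons x l ih =>
    intro d p h
    rw [List.foldl_cons]
    apply ih
    rw [PySem.Dict.getD_insert]
    split_ifs <;> simp [h]

-- and its key list is exactly the inserted (nodup, fresh) keys
lemma pvInit_keys (l : List String) :
    ∀ (d : PySem.Dict String (List Int)), l.Nodup → (∀ p ∈ l, d.contains p = false) →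
    (l.foldl (fun d q => d.insert q ([] : List Int)) d).keys = d.keys ++ l := by
  induction l with
  | nil => intro d _ _; simp
  | cons x l ih =>
    intro d hnd hfresh
    rw [List.foldl_cons]
    rw [ih (d.insert x []) (List.nodup_cons.mp hnd).2 ?_]
    · rw [PySem.Dict.keys_insert_of_not_contains _ _ (hfresh x (by simp))]
      simp
    · intro p hp
      rw [PySem.Dict.contains_insert]
      have hne : p ≠ x := by
        intro he; exact (List.nodup_cons.mp hnd).1 (he ▸ hp)
      simp [hne, hfresh p (List.mem_cons_of_mem _ hp)]

-- effect of the inner 'for m in lengths' loop on one bucket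
lemma pvInner_getD (tl : List Char) (i : Nat) (p : String) :
    ∀ (L : List Int) (d : PySem.Dict String (List Int)), L.Nodup → (∀ m ∈ L, 0 ≤ m) →
    ((L.foldl (pvInnerStep tl (i : Int)) d).getD p [])
      = d.getD p [] ++ (if (p.toList.length : Int) ∈ L ∧ d.contains p = true ∧ pvCond tl p i = true
          then [(i : Int)] else []) := by
  intro L
  induction L with
  | nil => intro d _ _; simp
  | cons m L ih =>
    intro d hnd hpos
    obtain ⟨hm0, hL0⟩ := List.forall_mem_cons.mp hpos
    have hndL := (List.nodup_cons.mp hnd).2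
    have hmnotL := (List.nodup_cons.mp hnd).1
    rw [List.foldl_cons]
    by_cases hm : m = (p.toList.length : Int)
    · -- the one iteration that can touch p's bucket
      subst hm
      have hnotin : (p.toList.length : Int) ∉ L := hmnotL
      have hnotinN : ((p.length : Nat) : Int) ∉ L := by simpa using hnotin
      rw [ih _ hndL hL0]
      have hcast : (i : Int) + (p.toList.length : Int) = ((i + p.toList.length : Nat) : Int) := by
        push_cast; ring
      by_cases hb : (i : Int) + (p.toList.length : Int) ≤ (tl.length : Int)
      · have hbn : i + p.toList.length ≤ tl.length := by exact_mod_cast hcast ▸ hb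
        have hslice : PySem.List.slice tl (some (i : Int))
            (some ((i : Int) + (p.toList.length : Int)))
            = List.take p.toList.length (tl.drop i) := by
          rw [hcast, PySem.List.slice_natCast]
          congr 1
          omega
        by_cases hpre : p.toList <+: tl.drop i
        · -- the window matches p
          have htake : List.take p.toList.length (tl.drop i) = p.toList :=
            (List.prefix_iff_eq_take.mp hpre).symm
          have hw : String.ofList (PySem.List.slice tl (some (i : Int))
              (some ((i : Int) + (p.toList.length : Int)))) = p := by
            rw [hslice, htake]; simp
          have hcond : pvCond tl p i = true := by
            unfold pvCond
            rw [Bool.and_eq_true, decide_eq_true_eq, decide_eq_true_eq]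
            exact ⟨hbn, hpre⟩
          by_cases hc : d.contains p = true
          · have hstep : pvInnerStep tl (i : Int) d (p.toList.length : Int)
                = d.modify p [] (fun l => l ++ [(i : Int)]) := by
              unfold pvInnerStep
              rw [if_pos hb]
              simp only [hw]
              rw [if_pos hc]
            rw [hstep, PySem.Dict.getD_modify_self]
            simp [hnotinN, hc, hcond, PySem.Dict.contains_modify]
          · have hcf : d.contains p = false := by
              cases hcc : d.contains p
              · rfl
              · exact absurd hcc hc
            have hstep : pvInnerStep tl (i : Int) d (p.toList.length : Int) = d := by
              unfold pvInnerStep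
              rw [if_pos hb]
              simp only [hw]
              rw [if_neg (by simp [hcf])]
            rw [hstep]
            simp [hnotinN, hcf]
        · -- window does not match p: whatever bucket is touched, it is not p's
          have hcond : pvCond tl p i = false := by
            unfold pvCond
            rw [decide_eq_false hpre, Bool.and_false]
          have hgd : (pvInnerStep tl (i : Int) d (p.toList.length : Int)).getD p [] = d.getD p [] := by
            unfold pvInnerStep
            rw [if_pos hb]
            split_ifs with hc
            · apply PySem.Dict.getD_modify_of_ne
              intro he
              apply hpre
              have h0 : p.toList = List.take p.toList.length (tl.drop i) := by
                have h1 := congrArg String.toList he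
                rw [String.toList_ofList, hslice] at h1
                exact h1
              rw [h0]
              exact List.take_prefix _ _
            · rfl
          rw [hgd, pvInnerStep_contains]
          simp [hnotinN, hcond]
      · have hcond : pvCond tl p i = false := by
          have hnot : ¬ (i + p.toList.length ≤ tl.length) := by
            intro hh; apply hb; rw [hcast]; exact_mod_cast hh
          unfold pvCond
          rw [decide_eq_false hnot, Bool.false_and]
        have hstep : pvInnerStep tl (i : Int) d (p.toList.length : Int) = d := by
          unfold pvInnerStep; rw [if_neg hb]
        rw [hstep]
        simp [hnotinN, hcond]
    · -- an iteration for a different length never touches p's bucket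
      rw [ih _ hndL hL0, pvInnerStep_contains]
      have hgd : (pvInnerStep tl (i : Int) d m).getD p [] = d.getD p [] := by
        unfold pvInnerStep
        split_ifs with h1 h2
        · apply PySem.Dict.getD_modify_of_ne
          intro he
          apply hm
          have hlen : p.toList.length
              = (PySem.List.slice tl (some (i : Int)) (some ((i : Int) + m))).length := by
            have := congrArg (fun s => s.toList.length) he
            simpa using this
          have hcast : (i : Int) + m = ((i + m.toNat : Nat) : Int) := by omega
          rw [hcast, PySem.List.slice_natCast] at hlen
          have hmn : i + m.toNat ≤ tl.length := by omega
          rw [List.length_take, List.length_drop] at hlen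
          omega
        · rfl
        · rfl
      rw [hgd]
      have hmem : ((p.toList.length : Int) ∈ m :: L) ↔ ((p.toList.length : Int) ∈ L) := by
        constructor
        · intro h
          rcases List.mem_cons.mp h with h | h
          · exact absurd h.symm hm
          · exact h
        · exact List.mem_cons_of_mem _
      simp only [hmem]

-- the whole scan fills each present bucket with exactly its occurrence positions
lemma pvScan_getD (tl : List Char) (lengths : List Int)
    (hnd : lengths.Nodup) (hpos : ∀ m ∈ lengths, 0 ≤ m)
    (d : PySem.Dict String (List Int)) (p : String)
    (hc : d.contains p = true) (hm : (p.toList.length : Int) ∈ lengths) :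
    (pvScan tl lengths d).getD p []
      = d.getD p [] ++ ((List.range (tl.length + 1)).filter (pvCond tl p)).map
          (fun k : Nat => (k : Int)) := by
  unfold pvScan
  have hcast : (tl.length : Int) + 1 = ((tl.length + 1 : Nat) : Int) := by push_cast; ring
  rw [hcast, PySem.List.pyRange_zero_natCast, List.foldl_map]
  -- fold over Nat positions; induct on the range length
  suffices h : ∀ k : Nat,
      ((List.range k).foldl (fun d (i : Nat) => lengths.foldl (pvInnerStep tl (i : Int)) d) d).getD p []
        = d.getD p [] ++ ((List.range k).filter (pvCond tl p)).map (fun j : Nat => (j : Int)) by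
    exact h (tl.length + 1)
  intro k
  induction k with
  | zero => simp
  | succ k ih =>
    rw [List.range_succ, List.foldl_append, List.filter_append, List.foldl_cons]
    have hkeys : ∀ (e : PySem.Dict String (List Int)),
        ((List.range k).foldl (fun d (i : Nat) => lengths.foldl (pvInnerStep tl (i : Int)) d) e).keys
          = e.keys := by
      intro e
      apply pvKeys_foldl
      intro d' x
      apply pvKeys_foldl
      intro d'' m
      exact pvInnerStep_keys tl (x : Int) d'' m
    have hcont : ((List.range k).foldl (fun d (i : Nat) => lengths.foldl (pvInnerStep tl (i : Int)) d) d).contains p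
        = d.contains p := pvContains_of_keys_eq _ _ (hkeys d) p
    rw [List.foldl_nil, pvInner_getD tl k p lengths _ hnd hpos, ih, hcont]
    simp only [hm, hc, true_and]
    cases hcd : pvCond tl p k
    · simp [hcd]
    · simp [hcd]

-- extending a filtered range beyond where the test can hold changes nothing
lemma pvFilterRange_ext (a : Nat) (q : Nat → Bool) (ha : ∀ i, a ≤ i → q i = false) :
    ∀ k : Nat, (List.range (a + k)).filter q = (List.range a).filter q := by
  intro k
  induction k with
  | zero => rfl
  | succ k ih =>
    have h1 : a + (k + 1) = (a + k) + 1 := by omega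
    rw [h1, List.range_succ, List.filter_append, ih]
    have h2 : q (a + k) = false := ha _ (by omega)
    simp [h2]

-- the scan's occurrence positions are exactly pvOccs
lemma pvCond_occs (tl : List Char) (p : String) :
    (List.range (tl.length + 1)).filter (pvCond tl p) = pvOccs tl p.toList := by
  have ha : tl.length + 1 - p.toList.length ≤ tl.length + 1 := by omega
  have hsplit : tl.length + 1
      = (tl.length + 1 - p.toList.length) + (tl.length + 1 - (tl.length + 1 - p.toList.length)) := by
    omega
  rw [hsplit, pvFilterRange_ext (tl.length + 1 - p.toList.length) (pvCond tl p) ?_]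
  · unfold pvOccs
    apply List.filter_congr
    intro i hi
    simp only [List.mem_range] at hi
    have hb : i + p.toList.length ≤ tl.length := by omega
    unfold pvCond
    rw [decide_eq_true hb, Bool.true_and]
  · intro i hile
    have hnot : ¬ (i + p.toList.length ≤ tl.length) := by omega
    unfold pvCond
    rw [decide_eq_false hnot, Bool.false_and]

-- ===== VERDICT (by name: the statement is the Claim_ definition above) =====
theorem find_country_mentions_spec : Claim_equal_find_country_mentions := by
  intro text country_map _
  unfold Spec_find_country_mentions
  simp only [find_country_mentions, find_country_mentions_alt]
  -- abbreviations
  set tl := PySem.Chars.lower text.toList with htl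
  set lengths := PySem.List.sorted
    (PySem.Set.ofList ((pvKeys country_map).map (fun p => (p.toList.length : Int))))
    (fun x => x) false with hlengths
  set buckets0 := (pvKeys country_map).foldl
    (fun d p => d.insert p ([] : List Int)) PySem.Dict.empty with hb0
  -- lengths facts
  have hperm := PySem.List.sorted_perm
    (PySem.Set.ofList ((pvKeys country_map).map (fun p => (p.toList.length : Int))))
    (fun x => x) false
  have hndL : lengths.Nodup := hperm.nodup_iff.mpr (PySem.Set.nodup_ofList _)
  have hposL : ∀ m ∈ lengths, 0 ≤ m := by
    intro m hmem
    rw [hlengths, PySem.List.mem_sorted, PySem.Set.mem_ofList, List.mem_map] at hmem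
    obtain ⟨q, _, rfl⟩ := hmem
    positivity
  -- buckets0 facts
  have hkeys0 : buckets0.keys = pvKeys country_map := by
    rw [hb0, pvInit_keys (pvKeys country_map) PySem.Dict.empty
      (PySem.List.nodup_dedup _) (fun p _ => PySem.Dict.contains_empty p)]
    simp [PySem.Dict.keys_empty]
  have hget0 : ∀ p, buckets0.getD p [] = [] := by
    intro p
    exact pvInit_getD (pvKeys country_map) PySem.Dict.empty p (PySem.Dict.getD_empty p [])
  -- scan keys
  have hkeysScan : (pvScan tl lengths buckets0).keys = pvKeys country_map := by
    unfold pvScan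
    rw [pvKeys_foldl _ (fun d i => pvKeys_foldl _ (fun d' m => pvInnerStep_keys tl i d' m) lengths d)]
    exact hkeys0
  -- the replay's phrase list is A's phrase list
  have hphr : PySem.List.sorted (pvScan tl lengths buckets0).keys
      (fun s => s.toList.length) true = pvPhrases country_map := by
    rw [hkeysScan]; rfl
  rw [hphr]
  -- both folds over pvPhrases agree phrase by phrase
  congr 2
  apply PySem.List.foldl_congr_mem
  intro st p hp
  have hpk : p ∈ pvKeys country_map := by
    rw [pvPhrases, PySem.List.mem_sorted] at hp
    exact hp
  have hc : buckets0.contains p = true := by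
    rw [PySem.Dict.contains_iff_mem_keys, hkeys0]
    exact hpk
  have hm : (p.toList.length : Int) ∈ lengths := by
    rw [hlengths, PySem.List.mem_sorted, PySem.Set.mem_ofList]
    exact List.mem_map_of_mem hpk
  rw [pvA_eq tl p (pvCode country_map p) st]
  rw [pvScan_getD tl lengths hndL hposL buckets0 p hc hm, hget0 p, List.nil_append,
    pvCond_occs tl p]
  rfl
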